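-- pv_equiv track=rewrite | github.com/panic80/mmrag5 | ingest_rag.py | extract_column_mapping
-- ===== SOURCE A (Python) =====
-- def extract_column_mapping(lines: list, separator_idx: int) -> dict:
--     """
--     Extract column-region mapping from multi-row headers in tables.
--
--     This function analyzes table headers to create a mapping between columns and regions,
--     which is essential for tables with multi-row headers (like geographical regions
--     specified in the second header row).
--
--     Args:
--         lines: List of all table lines as strings
--         separator_idx: Index of the separator line (with dashes/pipes)
--
--     Returns:
--         Dictionary mapping column indices to their regional context
--     """
--     # If no headers or only one header row, return empty mapping
--     if separator_idx <= 0: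
--         return {}
--
--     # Get header rows (excluding the separator line)
--     header_rows = [lines[i] for i in range(separator_idx)]
--
--     # Parse column positions from separator line
--     separator = lines[separator_idx]
--     column_positions = []
--     in_column = False
--
--     for i, char in enumerate(separator):
--         if char == '|':
--             if in_column:
--                 column_positions.append((start_pos, i))
--                 in_column = False
--             else:
--                 start_pos = i
--                 in_column = True
--
--     # Handle last column if needed
--     if in_column:
--         column_positions.append((start_pos, len(separator)))
--
--     # Initialize mapping
--     column_mapping = {}
--
--     # If we have multiple header rows, extract region information
--     if len(header_rows) >= 2:
--         # Extract region labels from the second row (index 1)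
--         if len(header_rows) > 1:
--             region_row = header_rows[1]
--             # Extract labels from each column position
--             for idx, (start, end) in enumerate(column_positions):
--                 if start < len(region_row) and end <= len(region_row):
--                     # Extract region label, handling limited-width columns
--                     label = region_row[start:end].strip(' |').strip()
--                     if label:
--                         column_mapping[idx] = label
--
--     # If no regions found in second row but we have more header rows, try the first row
--     if not column_mapping and header_rows:
--         first_row = header_rows[0]
--         for idx, (start, end) in enumerate(column_positions):
--             if start < len(first_row) and end <= len(first_row):
--                 label = first_row[start:end].strip(' |').strip()
--                 if label:
--                     column_mapping[idx] = label
--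
--     return column_mapping
-- ===== SOURCE B (Python) =====
-- def _spans(pipes, n):
--     if not pipes:
--         return []
--     if len(pipes) == 1:
--         return [(pipes[0], n)]
--     return [(pipes[0], pipes[1])] + _spans(pipes[2:], n)
--
--
-- def _labels(spans, row):
--     mapping = {}
--     for idx, (start, end) in enumerate(spans):
--         if start < len(row) and end <= len(row):
--             label = row[start:end].strip(' |').strip()
--             if label:
--                 mapping[idx] = label
--     return mapping
--
--
-- def extract_column_mapping(lines: list, separator_idx: int) -> dict:
--     if separator_idx <= 0:
--         return {}
--     separator = lines[separator_idx]
--     pipes = [i for i, c in enumerate(separator) if c == '|']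
--     spans = _spans(pipes, len(separator))
--     mapping = _labels(spans, lines[1]) if separator_idx >= 2 else {}
--     if not mapping:
--         mapping = _labels(spans, lines[0])
--     return mapping
-- ===== Notes on version B (the rewrite author's own statement) =====
-- stated objective: simpler
-- what changed: Replaces the stateful open/close boolean scan over the separator with collecting all pipe indices and pairing them two at a time, and replaces the two inline guarded extraction loops with one label-extraction helper applied to the chosen header row with a single empty-fallback.
import Mathlib
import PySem

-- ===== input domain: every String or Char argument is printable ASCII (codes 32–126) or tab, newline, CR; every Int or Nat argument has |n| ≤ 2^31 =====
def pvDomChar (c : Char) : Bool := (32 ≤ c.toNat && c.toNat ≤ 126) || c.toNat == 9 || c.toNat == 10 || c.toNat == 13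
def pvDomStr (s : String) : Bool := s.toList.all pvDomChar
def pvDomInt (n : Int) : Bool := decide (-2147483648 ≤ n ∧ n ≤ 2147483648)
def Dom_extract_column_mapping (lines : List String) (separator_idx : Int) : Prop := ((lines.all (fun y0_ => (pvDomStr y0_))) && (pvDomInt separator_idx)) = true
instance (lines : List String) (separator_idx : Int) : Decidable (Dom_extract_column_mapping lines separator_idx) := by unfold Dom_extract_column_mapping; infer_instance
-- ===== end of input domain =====

-- B replaces A's stateful open/close scan by pairing the collected pipe indices and factors the
-- guarded label-extraction loops into one helper with a single empty-fallback (objective: simpler).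

-- ===== PORT A =====
-- one step of A's 'for i, char in enumerate(separator)' scan; state = (column_positions, in_column, start_pos)
def pvScanStep (st : List (Int × Int) × Bool × Int) (p : Int × Char) :
    List (Int × Int) × Bool × Int :=
  if p.2 == '|' then
    if st.2.1 then (st.1 ++ [(st.2.2, p.1)], false, st.2.2)
    else (st.1, true, p.1)
  else st

-- body of A's label-extraction loops (identical in both of A's loops)
def pvLabelStep (row : String) (d : PySem.Dict Int String) (p : Int × Int × Int) :
    PySem.Dict Int String :=
  if p.2.1 < (row.length : Int) ∧ p.2.2 ≤ (row.length : Int) then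
    let label := PySem.Str.strip (PySem.Str.stripChars (PySem.Str.slice row (some p.2.1) (some p.2.2)) " |")
    if label ≠ "" then d.insert p.1 label else d
  else d

def extract_column_mapping (lines : List String) (separator_idx : Int) : List (Int × String) :=
  if separator_idx ≤ 0 then (PySem.Dict.empty : PySem.Dict Int String).items
  else
    let header_rows := (PySem.List.pyRange 0 separator_idx 1).map (fun i => PySem.List.pyGetD lines i "")
    let separator := PySem.List.pyGetD lines separator_idx ""
    let st := (PySem.List.enumerate separator.toList 0).foldl pvScanStep ([], false, 0)
    let column_positions := if st.2.1 then st.1 ++ [(st.2.2, (separator.length : Int))] else st.1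
    let column_mapping : PySem.Dict Int String :=
      if 2 ≤ header_rows.length then
        if 1 < header_rows.length then
          let region_row := PySem.List.pyGetD header_rows 1 ""
          (PySem.List.enumerate column_positions 0).foldl (pvLabelStep region_row) PySem.Dict.empty
        else PySem.Dict.empty
      else PySem.Dict.empty
    let column_mapping :=
      if column_mapping.items = [] ∧ header_rows ≠ [] then
        let first_row := PySem.List.pyGetD header_rows 0 ""
        (PySem.List.enumerate column_positions 0).foldl (pvLabelStep first_row) PySem.Dict.empty
      else column_mapping
    column_mapping.items

-- ===== PORT B =====
-- Source B's _spans: pair the pipe indices two at a time; a leftover pipe spans to n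
def pvSpans (pipes : List Int) (n : Int) : List (Int × Int) :=
  match pipes with
  | [] => []
  | [p] => [(p, n)]
  | p :: q :: rest => (p, q) :: pvSpans rest n

-- Source B's _labels helper
def pvLabels (spans : List (Int × Int)) (row : String) : PySem.Dict Int String :=
  (PySem.List.enumerate spans 0).foldl (pvLabelStep row) PySem.Dict.empty

def extract_column_mapping_alt (lines : List String) (separator_idx : Int) : List (Int × String) :=
  if separator_idx ≤ 0 then []
  else
    let separator := PySem.List.pyGetD lines separator_idx ""
    let pipes := ((PySem.List.enumerate separator.toList 0).filter (fun p => p.2 == '|')).map (·.1)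
    let spans := pvSpans pipes (separator.length : Int)
    let mapping := if 2 ≤ separator_idx then pvLabels spans (PySem.List.pyGetD lines 1 "") else PySem.Dict.empty
    let mapping := if mapping.items = [] then pvLabels spans (PySem.List.pyGetD lines 0 "") else mapping
    mapping.items

-- ===== PRECONDITION & SPEC =====
-- Pre_ excludes exactly the inputs where the Python A raises IndexError: 0 < separator_idx with
-- separator_idx out of range of lines (B raises there too).
def Pre_extract_column_mapping (lines : List String) (separator_idx : Int) : Prop :=
  separator_idx ≤ 0 ∨ separator_idx < (lines.length : Int)
instance (lines : List String) (separator_idx : Int) : Decidable (Pre_extract_column_mapping lines separator_idx) := by unfold Pre_extract_column_mapping; infer_instance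

def pvWitness_extract_column_mapping : List String × Int :=
  (["| P | Q |", "| east | west |", "|-----|------|"], 2)

def Spec_extract_column_mapping (lines : List String) (separator_idx : Int) (out : List (Int × String)) : Prop := out = extract_column_mapping_alt lines separator_idx
instance (lines : List String) (separator_idx : Int) (out : List (Int × String)) : Decidable (Spec_extract_column_mapping lines separator_idx out) := by unfold Spec_extract_column_mapping; infer_instance

-- ===== CLAIM (what is proved, stated in full; the proofs are below) =====
def Claim_equal_extract_column_mapping : Prop := ∀ (lines : List String) (separator_idx : Int), Dom_extract_column_mapping lines separator_idx → Pre_extract_column_mapping lines separator_idx → Spec_extract_column_mapping lines separator_idx (extract_column_mapping lines separator_idx)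

-- ===== LEMMAS AND PROOFS =====

-- A's scan, finished with the odd-pipe tail, equals pairing of the pipe indices.
def pvFinish (st : List (Int × Int) × Bool × Int) (n : Int) : List (Int × Int) :=
  if st.2.1 then st.1 ++ [(st.2.2, n)] else st.1

theorem pvScan_eq (l : List (Int × Char)) : ∀ (acc : List (Int × Int)) (sp s n : Int),
    pvFinish (l.foldl pvScanStep (acc, false, sp)) n
      = acc ++ pvSpans ((l.filter (fun p => p.2 == '|')).map (·.1)) n
    ∧ pvFinish (l.foldl pvScanStep (acc, true, s)) n
      = acc ++ pvSpans (s :: (l.filter (fun p => p.2 == '|')).map (·.1)) n := by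
  induction l with
  | nil => intro acc sp s n; simp [pvFinish, pvSpans]
  | cons hd tl ih =>
    intro acc sp s n
    by_cases hp : hd.2 == '|'
    · constructor
      · simp only [List.foldl_cons, pvScanStep, hp, if_pos]
        simpa [hp] using (ih acc sp hd.1 n).2
      · simp only [List.foldl_cons, pvScanStep, hp, if_true]
        have := (ih (acc ++ [(s, hd.1)]) s sp n).1
        simp only [List.append_assoc] at this
        simpa [hp, pvSpans] using this
    · constructor
      · simp only [List.foldl_cons, pvScanStep, hp]
        simpa [hp] using (ih acc sp s n).1
      · simp only [List.foldl_cons, pvScanStep, hp]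
        simpa [hp] using (ih acc sp s n).2

theorem pvHeader_get (lines : List String) (sep i : Int) (h0 : 0 ≤ i) (hi : i < sep) :
    PySem.List.pyGetD ((PySem.List.pyRange 0 sep 1).map (fun j => PySem.List.pyGetD lines j "")) i ""
      = PySem.List.pyGetD lines i "" := by
  exact PySem.List.pyGetD_map_pyRange_of_nonneg _ sep i "" h0 hi

-- ===== VERDICT (by name: the statement is the Claim_ definition above) =====
theorem extract_column_mapping_spec : Claim_equal_extract_column_mapping := by
  intro lines sep _hdom _hpre
  unfold Spec_extract_column_mapping extract_column_mapping extract_column_mapping_alt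
  by_cases hsep : sep ≤ 0
  · simp [hsep, PySem.Dict.empty]
  · simp only [if_neg hsep]
    have hpos : 0 < sep := lt_of_not_ge hsep
    set separator := PySem.List.pyGetD lines sep "" with hsepdef
    have hlen : ((PySem.List.pyRange 0 sep 1).map (fun i => PySem.List.pyGetD lines i "")).length = sep.toNat := by
      simp [PySem.List.length_pyRange_one]
    have hpos_eq :
        (if ((PySem.List.enumerate separator.toList 0).foldl pvScanStep ([], false, 0)).2.1 then
           ((PySem.List.enumerate separator.toList 0).foldl pvScanStep ([], false, 0)).1
             ++ [(((PySem.List.enumerate separator.toList 0).foldl pvScanStep ([], false, 0)).2.2, (separator.length : Int))]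
         else ((PySem.List.enumerate separator.toList 0).foldl pvScanStep ([], false, 0)).1)
          = pvSpans (((PySem.List.enumerate separator.toList 0).filter (fun p => p.2 == '|')).map (·.1)) (separator.length : Int) := by
      have := (pvScan_eq (PySem.List.enumerate separator.toList 0) [] 0 0 (separator.length : Int)).1
      simpa [pvFinish] using this
    rw [hpos_eq, hsepdef]
    have hne : ((PySem.List.pyRange 0 sep 1).map (fun i => PySem.List.pyGetD lines i "")) ≠ [] := by
      intro h
      have hl := congrArg List.length h
      rw [hlen] at hl
      simp at hl
      omega
    have hget0 := pvHeader_get lines sep 0 (by omega) (by omega)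
    have hemp : (PySem.Dict.empty : PySem.Dict Int String).items = [] := rfl
    by_cases h2 : 2 ≤ sep
    · have hget1 := pvHeader_get lines sep 1 (by omega) (by omega)
      have hL2 : 2 ≤ ((PySem.List.pyRange 0 sep 1).map (fun i => PySem.List.pyGetD lines i "")).length := by
        rw [hlen]; omega
      have hL1 : 1 < ((PySem.List.pyRange 0 sep 1).map (fun i => PySem.List.pyGetD lines i "")).length := by
        rw [hlen]; omega
      rw [if_pos hL2, if_pos hL1, hget1, hget0, if_pos h2]
      simp only [pvLabels]
      split_ifs with hA hB hC
      · rfl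
      · exact absurd hA.1 hB
      · exact absurd ⟨hC, hne⟩ hA
      · rfl
    · have hL2 : ¬ 2 ≤ ((PySem.List.pyRange 0 sep 1).map (fun i => PySem.List.pyGetD lines i "")).length := by
        rw [hlen]; omega
      rw [if_neg hL2, if_neg h2, hget0]
      simp only [pvLabels]
      rw [if_pos ⟨hemp, hne⟩, if_pos hemp]
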